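-- pv_equiv track=rewrite | github.com/jenjnif/prime_numbers | finding_unique_primes.py | unique_prime_factors
-- ===== SOURCE A (Python) =====
-- def unique_prime_factors(n):
--     primes = []
--     total = 1
--     if n == 1:
--         primes = [1]
--         return primes
--     for i in range(2, n):
--         if is_prime(i):
--             total = total * i
--             if total < n:
--                 primes.append(i)
--     return primes
--
-- def is_prime(x):
--     prime = True
--     for i in range(2, x):
--         if x % i == 0:
--             prime = False
--     return prime
-- ===== SOURCE B (Python) =====
-- def unique_prime_factors(n):
--     if n == 1:
--         return [1]
--     primes = []
--     total = 1
--     for p in range(2, n):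
--         if total * p >= n:
--             break
--         if _is_prime(p):
--             primes.append(p)
--             total *= p
--     return primes
--
-- def _is_prime(x):
--     if x < 2:
--         return False
--     d = 2
--     while d * d <= x:
--         if x % d == 0:
--             return False
--         d += 1
--     return True
-- ===== Notes on version B (the rewrite author's own statement) =====
-- stated objective: faster
-- what changed: B breaks out of the candidate loop as soon as the cumulative product reaches n (instead of scanning all of range(2,n)) and tests primality by trial division up to sqrt(x) with early exit (instead of dividing by every i < x).
import Mathlib
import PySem

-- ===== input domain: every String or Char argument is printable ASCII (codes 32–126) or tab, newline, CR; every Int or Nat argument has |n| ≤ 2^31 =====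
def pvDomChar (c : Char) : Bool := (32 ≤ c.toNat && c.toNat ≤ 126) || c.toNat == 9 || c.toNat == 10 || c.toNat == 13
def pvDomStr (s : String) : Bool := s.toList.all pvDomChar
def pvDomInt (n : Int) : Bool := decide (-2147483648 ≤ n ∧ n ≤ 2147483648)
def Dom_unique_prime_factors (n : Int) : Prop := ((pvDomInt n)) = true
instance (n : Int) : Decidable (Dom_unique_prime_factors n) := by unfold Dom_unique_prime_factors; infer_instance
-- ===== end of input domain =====

-- B breaks once the cumulative product reaches n and uses a sqrt trial-division primality
-- test with early exit, instead of A's full scan of range(2, n) with an O(i) primality test.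

-- ===== PORT A =====
-- is_prime from Source A: trial division over ALL of range(2, x), no early exit
def isPrimeA (x : Int) : Bool :=
  (PySem.List.pyRange 2 x 1).foldl
    (fun prime i => if PySem.Int.mod x i == 0 then false else prime) true

-- one iteration of A's main loop (state = (primes, total))
def stepA (n : Int) (st : List Int × Int) (i : Int) : List Int × Int :=
  if isPrimeA i then
    let total := st.2 * i
    if total < n then (st.1 ++ [i], total) else (st.1, total)
  else st

def unique_prime_factors (n : Int) : List Int :=
  if n == 1 then [1]
  else ((PySem.List.pyRange 2 n 1).foldl (stepA n) ([], 1)).1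

-- ===== PORT B =====
-- _is_prime from Source B: while d*d <= x, early exit on a divisor
def isPrimeBLoop (x : Int) (d : Int) : Bool :=
  if h : d * d ≤ x then
    (if PySem.Int.mod x d == 0 then false else isPrimeBLoop x (d + 1))
  else true
termination_by (x + 1 - d).toNat
decreasing_by
  have h2 : 0 ≤ x := le_trans (mul_self_nonneg d) h
  have h1 : 2 * d ≤ x + 1 := by nlinarith [sq_nonneg (d - 1)]
  omega

def isPrimeB (x : Int) : Bool :=
  if x < 2 then false else isPrimeBLoop x 2

-- Source B's main loop over range(2, n) with the break 'total * p >= n'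
def altGo (n : Int) (total : Int) (primes : List Int) : List Int → List Int
  | [] => primes
  | p :: rest =>
    if n ≤ total * p then primes
    else if isPrimeB p then altGo n (total * p) (primes ++ [p]) rest
    else altGo n total primes rest

def unique_prime_factors_alt (n : Int) : List Int :=
  if n == 1 then [1]
  else altGo n 1 [] (PySem.List.pyRange 2 n 1)

-- ===== PRECONDITION & SPEC =====
def Spec_unique_prime_factors (n : Int) (out : List Int) : Prop := out = unique_prime_factors_alt n
instance (n : Int) (out : List Int) : Decidable (Spec_unique_prime_factors n out) := by unfold Spec_unique_prime_factors; infer_instance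

-- ===== CLAIM (what is proved, stated in full; the proofs are below) =====
def Claim_equal_unique_prime_factors : Prop := ∀ (n : Int), Dom_unique_prime_factors n → Spec_unique_prime_factors n (unique_prime_factors n)

-- ===== LEMMAS AND PROOFS =====

-- A's primality fold is an 'all' over the range
lemma isPrimeA_eq_all (x : Int) :
    isPrimeA x = (PySem.List.pyRange 2 x 1).all (fun i => !(PySem.Int.mod x i == 0)) := by
  unfold isPrimeA
  generalize PySem.List.pyRange 2 x 1 = l
  suffices h : ∀ (l : List Int) (b : Bool),
      l.foldl (fun prime i => if PySem.Int.mod x i == 0 then false else prime) b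
        = (b && l.all (fun i => !(PySem.Int.mod x i == 0))) by
    simpa using h l true
  intro l
  induction l with
  | nil => simp
  | cons p rest ih =>
    intro b
    simp only [List.foldl_cons, List.all_cons, ih]
    by_cases hp : PySem.Int.mod x p == 0 <;> simp [hp]

lemma isPrimeBLoop_iff (x : Int) :
    ∀ d, 2 ≤ d → (isPrimeBLoop x d = true ↔ (∀ e, d ≤ e → e * e ≤ x → ¬ (x % e = 0))) := by
  intro d
  induction d using isPrimeBLoop.induct (x := x) with
  | case1 d h hdvd =>
    intro hd2
    rw [isPrimeBLoop, dif_pos h, if_pos hdvd]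
    have hmod : x % d = 0 :=
      Int.emod_eq_zero_of_dvd ((PySem.Int.mod_eq_zero_iff_dvd x d).mp ((beq_iff_eq).mp hdvd))
    simp only [Bool.false_eq_true, false_iff]
    intro hall
    exact hall d le_rfl h hmod
  | case2 d h hdvd ih =>
    intro hd2
    rw [isPrimeBLoop, dif_pos h, if_neg hdvd, ih (by omega)]
    constructor
    · intro hall e hde hee
      rcases eq_or_lt_of_le hde with rfl | hlt
      · intro hmod
        have : d ∣ x := Int.dvd_of_emod_eq_zero hmod
        have : PySem.Int.mod x d = 0 := (PySem.Int.mod_eq_zero_iff_dvd x d).mpr this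
        exact hdvd (by simpa using this)
      · exact hall e (by omega) hee
    · intro hall e hde hee
      exact hall e (by omega) hee
  | case3 d h =>
    intro hd2
    rw [isPrimeBLoop, dif_neg h]
    simp only [true_iff]
    intro e hde hee hmod
    -- e*e ≤ x but d*d > x and d ≤ e: contradiction since e*e ≥ d*d when... need care
    have hx : 0 ≤ x := le_trans (mul_self_nonneg e) hee
    have : d * d ≤ e * e := by nlinarith
    omega

lemma isPrimeA_iff (x : Int) :
    isPrimeA x = true ↔ (∀ i, 2 ≤ i → i < x → ¬ (x % i = 0)) := by
  rw [isPrimeA_eq_all, List.all_eq_true]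
  constructor
  · intro h i h2 hix hmod
    have hi : i ∈ PySem.List.pyRange 2 x 1 := (PySem.List.mem_pyRange_one).mpr ⟨h2, hix⟩
    have := h i hi
    rw [PySem.Int.mod_eq_emod_of_pos (by omega : (0:Int) < i)] at this
    simp [hmod] at this
  · intro h i hi
    have := (PySem.List.mem_pyRange_one).mp hi
    have hne := h i this.1 this.2
    rw [PySem.Int.mod_eq_emod_of_pos (by omega : (0:Int) < i)]
    simpa using hne

lemma isPrimeB_iff (x : Int) (hx : 2 ≤ x) :
    isPrimeB x = true ↔ (∀ e, 2 ≤ e → e * e ≤ x → ¬ (x % e = 0)) := by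
  unfold isPrimeB
  rw [if_neg (by omega : ¬ x < 2)]
  exact isPrimeBLoop_iff x 2 (by omega)

-- the two primality tests agree on every candidate ≥ 2
lemma isPrime_eq (x : Int) (hx : 2 ≤ x) : isPrimeA x = isPrimeB x := by
  have hA := isPrimeA_iff x
  have hB := isPrimeB_iff x hx
  cases hA' : isPrimeA x <;> cases hB' : isPrimeB x <;> try rfl
  · -- A false, B true: some divisor 2 ≤ i < x, but none with e*e ≤ x
    exfalso
    have hall := hB.mp hB'
    have : ¬ (∀ i, 2 ≤ i → i < x → ¬ (x % i = 0)) := by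
      intro hc; simp [hA.mpr hc] at hA'
    push_neg at this
    obtain ⟨i, h2i, hix, hmod⟩ := this
    have hdvd : i ∣ x := Int.dvd_of_emod_eq_zero hmod
    obtain ⟨j, hj⟩ := hdvd
    have hjpos : 1 ≤ j := by nlinarith
    have hj2 : 2 ≤ j := by
      rcases eq_or_lt_of_le hjpos with rfl | h
      · omega
      · omega
    -- take the smaller of i, j
    rcases le_total i j with hle | hle
    · exact hall i h2i (by nlinarith) hmod
    · have : x % j = 0 := Int.emod_eq_zero_of_dvd ⟨i, by rw [hj]; ring⟩
      exact hall j hj2 (by nlinarith) this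
  · -- A true, B false: no divisor in 2..x-1, but B found e with e*e ≤ x, x % e = 0
    exfalso
    have hallA := hA.mp hA'
    have : ¬ (∀ e, 2 ≤ e → e * e ≤ x → ¬ (x % e = 0)) := by
      intro hc; simp [hB.mpr hc] at hB'
    push_neg at this
    obtain ⟨e, h2e, hee, hmod⟩ := this
    have : e < x := by nlinarith
    exact hallA e h2e this hmod

-- once total*p has reached n, A's remaining fold appends nothing
lemma foldA_noapp (n : Int) :
    ∀ (l : List Int) (primes : List Int) (total p : Int), 1 ≤ total → 2 ≤ p →
      n ≤ total * p → (∀ q ∈ l, p ≤ q ∧ 2 ≤ q) →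
      (l.foldl (stepA n) (primes, total)).1 = primes := by
  intro l
  induction l with
  | nil => intro primes total p _ _ _ _; rfl
  | cons q rest ih =>
    intro primes total p htot hp hn hall
    have hq := hall q (List.mem_cons_self)
    have hrest : ∀ r ∈ rest, p ≤ r ∧ 2 ≤ r := fun r hr => hall r (List.mem_cons_of_mem _ hr)
    simp only [List.foldl_cons]
    unfold stepA
    by_cases hpr : isPrimeA q
    · have haux : (0:Int) ≤ total * p * (q - 1) :=
        mul_nonneg (mul_nonneg (by linarith) (by linarith)) (by linarith [hq.1])
      have hge : n ≤ total * q := le_trans hn (by nlinarith [haux])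
      rw [if_pos hpr]
      simp only [if_neg (not_lt.mpr hge)]
      exact ih primes (total * q) p (by nlinarith [hq.2]) hp
        (le_trans hn (by nlinarith [haux])) hrest
    · rw [if_neg hpr]
      exact ih primes total p htot hp hn hrest

-- main loop equivalence on a sorted list of candidates ≥ 2
lemma fold_eq_altGo (n : Int) :
    ∀ (l : List Int) (primes : List Int) (total : Int), 1 ≤ total →
      (∀ q ∈ l, 2 ≤ q) → l.Sorted (· ≤ ·) →
      (l.foldl (stepA n) (primes, total)).1 = altGo n total primes l := by
  intro l
  induction l with
  | nil => intro primes total _ _ _; rfl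
  | cons p rest ih =>
    intro primes total htot hall hsort
    have hp : 2 ≤ p := hall p (List.mem_cons_self)
    have hrest2 : ∀ q ∈ rest, 2 ≤ q := fun q hq => hall q (List.mem_cons_of_mem _ hq)
    have hrestp : ∀ q ∈ rest, p ≤ q := fun q hq => (List.sorted_cons.mp hsort).1 q hq
    have hsort' : rest.Sorted (· ≤ ·) := (List.sorted_cons.mp hsort).2
    simp only [List.foldl_cons, altGo]
    by_cases hbrk : n ≤ total * p
    · rw [if_pos hbrk]
      unfold stepA
      by_cases hpr : isPrimeA p
      · rw [if_pos hpr]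
        simp only [if_neg (not_lt.mpr hbrk)]
        have haux : (0:Int) ≤ total * p * (p - 1) :=
          mul_nonneg (mul_nonneg (by linarith) (by linarith)) (by linarith)
        exact foldA_noapp n rest primes (total * p) p (by nlinarith) hp
          (le_trans hbrk (by nlinarith [haux])) (fun q hq => ⟨hrestp q hq, hrest2 q hq⟩)
      · rw [if_neg hpr]
        exact foldA_noapp n rest primes total p htot hp hbrk
          (fun q hq => ⟨hrestp q hq, hrest2 q hq⟩)
    · rw [if_neg hbrk]
      unfold stepA
      rw [isPrime_eq p hp]
      by_cases hpr : isPrimeB p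
      · rw [if_pos hpr, if_pos hpr]
        simp only [if_pos (not_le.mp hbrk)]
        exact ih (primes ++ [p]) (total * p) (by nlinarith) hrest2 hsort'
      · rw [if_neg hpr, if_neg hpr]
        exact ih primes total htot hrest2 hsort'

-- ===== VERDICT (by name: the statement is the Claim_ definition above) =====
theorem unique_prime_factors_spec : Claim_equal_unique_prime_factors := by
  intro n _
  unfold Spec_unique_prime_factors unique_prime_factors unique_prime_factors_alt
  by_cases h1 : n = 1
  · simp [h1]
  · rw [if_neg (by simpa using h1), if_neg (by simpa using h1)]
    refine fold_eq_altGo n _ [] 1 le_rfl ?_ ?_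
    · intro q hq; exact ((PySem.List.mem_pyRange_one).mp hq).1
    · exact List.Pairwise.imp (fun h => le_of_lt h) (PySem.List.pairwise_lt_pyRange_one 2 n)
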